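-- pv_equiv track=rewrite | github.com/xznhj8129/uav_protocol_experiments | test_network_hierarchy.py | enumerate_bit_compositions
-- ===== SOURCE A (Python) =====
-- import math
--
-- def enumerate_bit_compositions(target, val_range):
--     """
--     Enumerate all compositions using integers from val_range such that
--     2^(sum of the composition) equals the target.
--
--     Parameters:
--       target (int): The target decimal value (should be a power of 2).
--       val_range (iterable of int): Allowed integers, each treated as a bit count.
--
--     Returns:
--       list of lists: Each inner list is a composition whose parts sum to log2(target).
--     """
--     # Check if target is a power of 2
--     if target <= 0 or (target & (target - 1)) != 0:
--         raise ValueError("Target must be a power of 2.")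
--
--     bit_target = int(math.log2(target))
--     solutions = []
--
--     def backtrack(current, current_sum):
--         # If the sum of parts equals bit_target, we have a valid composition.
--         if current_sum == bit_target:
--             solutions.append(current.copy())
--             return
--         # If we exceed the required bit sum, backtrack.
--         if current_sum > bit_target:
--             return
--
--         # Try each allowed value.
--         for num in val_range:
--             if current_sum + num <= bit_target:
--                 current.append(num)
--                 backtrack(current, current_sum + num)
--                 current.pop()
--
--     backtrack([], 0)
--     return solutions
-- ===== SOURCE B (Python) =====
-- import math
--
-- def enumerate_bit_compositions(target, val_range):
--     if target <= 0 or (target & (target - 1)) != 0: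
--         raise ValueError("Target must be a power of 2.")
--     bit_target = int(math.log2(target))
--     memo = {}
--
--     def comps(r):
--         if r in memo:
--             return memo[r]
--         if r == 0:
--             res = [[]]
--         else:
--             res = [[num] + tail for num in val_range if num <= r for tail in comps(r - num)]
--         memo[r] = res
--         return res
--
--     return comps(bit_target)
-- ===== Notes on version B (the rewrite author's own statement) =====
-- stated objective: alternative
-- what changed: Replaced A's depth-first backtracking that mutates a shared current list and appends to a solutions accumulator with a recursion on the remaining bit sum that returns lists of compositions, memoized in a dict keyed by the remaining sum so each subproblem is solved once.
import Mathlib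
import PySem

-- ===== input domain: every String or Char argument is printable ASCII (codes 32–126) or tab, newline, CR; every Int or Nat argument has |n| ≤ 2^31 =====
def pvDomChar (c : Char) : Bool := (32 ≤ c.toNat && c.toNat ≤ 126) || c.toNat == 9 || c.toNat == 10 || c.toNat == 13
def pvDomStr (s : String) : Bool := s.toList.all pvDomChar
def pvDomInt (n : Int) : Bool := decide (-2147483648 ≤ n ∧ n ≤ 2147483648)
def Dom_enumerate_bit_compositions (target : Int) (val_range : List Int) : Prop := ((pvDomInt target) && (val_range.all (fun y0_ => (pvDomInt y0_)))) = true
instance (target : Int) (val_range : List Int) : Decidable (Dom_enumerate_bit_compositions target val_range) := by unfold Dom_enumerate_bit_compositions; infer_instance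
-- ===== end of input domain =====

-- B replaces A's mutable-accumulator backtracking by a memoized recursion on the remaining
-- bit sum that returns lists of compositions (objective: alternative decomposition).

-- ===== PORT A =====
-- backtrack(current, current_sum): the fuel argument only makes the recursion total; on every
-- input admitted by Pre_ (all values positive, or bit_target = 0) the initial fuel
-- bit_target+1 is never exhausted, so it is a transcription of A's recursion.
def pvBacktrackA (bt : Int) (val_range : List Int) :
    Nat → List Int → Int → List (List Int) → List (List Int)
  | 0, _, _, sols => sols
  | fuel + 1, current, current_sum, sols =>
    if current_sum = bt then sols ++ [current]
    else if bt < current_sum then sols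
    else val_range.foldl
      (fun sols num =>
        if current_sum + num ≤ bt then
          pvBacktrackA bt val_range fuel (current ++ [num]) (current_sum + num) sols
        else sols)
      sols

def enumerate_bit_compositions (target : Int) (val_range : List Int) : List (List Int) :=
  if target ≤ 0 ∨ PySem.Int.band target (target - 1) ≠ 0 then []  -- Python raises ValueError here; excluded by Pre_
  else
    -- int(math.log2(target)): exact as Nat.log2 because target is a positive power of 2 ≤ 2^31
    let bit_target : Int := (target.toNat.log2 : Int)
    pvBacktrackA bit_target val_range (bit_target.toNat + 1) [] 0 []

-- ===== PORT B =====
-- comps(r) with the memo dict threaded as state; fuel only makes the recursion total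
-- (never exhausted on Pre_ inputs, as for A's port).
def pvCompsB (val_range : List Int) :
    Nat → Int → PySem.Dict Int (List (List Int)) →
    List (List Int) × PySem.Dict Int (List (List Int))
  | 0, _, memo => ([], memo)
  | fuel + 1, r, memo =>
    match memo.get? r with
    | some v => (v, memo)
    | none =>
      let p :=
        if r = 0 then ([([] : List Int)], memo)
        else
          val_range.foldl
            (fun acc num =>
              if num ≤ r then
                let q := pvCompsB val_range fuel (r - num) acc.2
                (acc.1 ++ q.1.map (fun tail => num :: tail), q.2)
              else acc)
            (([] : List (List Int)), memo)
      (p.1, p.2.insert r p.1)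

def enumerate_bit_compositions_alt (target : Int) (val_range : List Int) : List (List Int) :=
  if target ≤ 0 ∨ PySem.Int.band target (target - 1) ≠ 0 then []  -- Python raises ValueError here; excluded by Pre_
  else
    let bit_target : Int := (target.toNat.log2 : Int)
    (pvCompsB val_range (bit_target.toNat + 1) bit_target PySem.Dict.empty).1

-- ===== PRECONDITION & SPEC =====
-- Pre_ excludes only inputs on which A raises: a target that is not a positive power of 2
-- (ValueError), and a val_range containing a non-positive value while bit_target > 0
-- (unbounded recursion, RecursionError). Both programs raise identically there.
def Pre_enumerate_bit_compositions (target : Int) (val_range : List Int) : Prop :=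
  0 < target ∧ PySem.Int.band target (target - 1) = 0 ∧
    (target = 1 ∨ ∀ v ∈ val_range, 0 < v)
instance (target : Int) (val_range : List Int) : Decidable (Pre_enumerate_bit_compositions target val_range) := by unfold Pre_enumerate_bit_compositions; infer_instance

def pvWitness_enumerate_bit_compositions : Int × List Int := (8, [1, 2])

def Spec_enumerate_bit_compositions (target : Int) (val_range : List Int) (out : List (List Int)) : Prop := out = enumerate_bit_compositions_alt target val_range
instance (target : Int) (val_range : List Int) (out : List (List Int)) : Decidable (Spec_enumerate_bit_compositions target val_range out) := by unfold Spec_enumerate_bit_compositions; infer_instance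

-- ===== CLAIM (what is proved, stated in full; the proofs are below) =====
def Claim_equal_enumerate_bit_compositions : Prop := ∀ (target : Int) (val_range : List Int), Dom_enumerate_bit_compositions target val_range → Pre_enumerate_bit_compositions target val_range → Spec_enumerate_bit_compositions target val_range (enumerate_bit_compositions target val_range)

-- ===== LEMMAS AND PROOFS =====

-- Pure specification of B's comps(r): the same recursion without the memo dict.
def pvComps0 (val_range : List Int) : Nat → Int → List (List Int)
  | 0, _ => []
  | fuel + 1, r =>
    if r = 0 then [[]]
    else
      val_range.foldl
        (fun acc num =>
          if num ≤ r then acc ++ (pvComps0 val_range fuel (r - num)).map (fun tail => num :: tail)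
          else acc)
        []

-- With positive values, pvComps0 is fuel-insensitive once fuel exceeds r.
theorem pvComps0_fuel (val_range : List Int) (hpos : ∀ v ∈ val_range, 0 < v) :
    ∀ (f1 f2 : Nat) (r : Int), 0 ≤ r → r < (f1 : Int) → r < (f2 : Int) →
      pvComps0 val_range f1 r = pvComps0 val_range f2 r := by
  intro f1
  induction f1 with
  | zero => intro f2 r hr h1 _; exact absurd h1 (by omega)
  | succ g1 ih =>
    intro f2 r hr h1 h2
    cases f2 with
    | zero => exact absurd h2 (by omega)
    | succ g2 =>
      simp only [pvComps0]
      by_cases hr0 : r = 0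
      · simp [hr0]
      · simp only [hr0, if_false]
        refine PySem.List.foldl_congr_mem _ _ _ _ (fun acc num hnum => ?_)
        by_cases hle : num ≤ r
        · have hv := hpos num hnum
          rw [if_pos hle, if_pos hle,
            ih g2 (r - num) (by omega) (by omega) (by omega)]
        · simp [hle]

-- A's backtracking equals sols ++ (comps of the remaining sum), prefixed by current.
theorem pvBacktrackA_eq (bt : Int) (val_range : List Int) (hpos : ∀ v ∈ val_range, 0 < v) :
    ∀ (fuel : Nat) (current : List Int) (s : Int) (sols : List (List Int)),
      0 ≤ bt - s → bt - s < (fuel : Int) →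
      pvBacktrackA bt val_range fuel current s sols =
        sols ++ (pvComps0 val_range fuel (bt - s)).map (fun t => current ++ t) := by
  intro fuel
  induction fuel with
  | zero => intro _ _ _ h1 h2; exact absurd h2 (by omega)
  | succ g ih =>
    intro current s sols h1 h2
    simp only [pvBacktrackA, pvComps0]
    by_cases hs : s = bt
    · simp [hs]
    · have hlt : ¬ bt < s := by omega
      have hne : ¬ (bt - s = 0) := by omega
      simp only [hs, if_false, hlt, hne]
      -- fold over val_range, relating the two accumulators
      have aux : ∀ (l : List Int), (∀ x ∈ l, x ∈ val_range) →
          ∀ (acc : List (List Int)) (sols : List (List Int)),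
            l.foldl
              (fun sols num =>
                if s + num ≤ bt then
                  pvBacktrackA bt val_range g (current ++ [num]) (s + num) sols
                else sols)
              (sols ++ acc.map (fun t => current ++ t)) =
            sols ++ (l.foldl
              (fun acc num =>
                if num ≤ bt - s then
                  acc ++ (pvComps0 val_range g (bt - s - num)).map (fun tail => num :: tail)
                else acc) acc).map (fun t => current ++ t) := by
        intro l
        induction l with
        | nil => intro _ acc sols; simp
        | cons num l ihl =>
          intro hmem acc sols
          have hnum : num ∈ val_range := hmem num (by simp)
          have hrest : ∀ x ∈ l, x ∈ val_range := fun x hx => hmem x (by simp [hx])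
          by_cases hle : num ≤ bt - s
          · have hle' : s + num ≤ bt := by omega
            have hv := hpos num hnum
            simp only [List.foldl_cons, if_pos hle, if_pos hle']
            rw [ih (current ++ [num]) (s + num)
              (sols ++ acc.map (fun t => current ++ t)) (by omega) (by omega)]
            have hsub : bt - (s + num) = bt - s - num := by ring
            rw [hsub]
            have := ihl hrest
              (acc ++ (pvComps0 val_range g (bt - s - num)).map (fun tail => num :: tail)) sols
            rw [← this]
            congr 1
            simp [List.map_append, List.append_assoc, Function.comp]
          · have hle' : ¬ s + num ≤ bt := by omega
            simp only [List.foldl_cons, if_neg hle, if_neg hle']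
            exact ihl hrest acc sols
      have h := aux val_range (fun x hx => hx) [] sols
      simpa using h

-- Invariant of B's memo dict: every stored entry is the pure comps value of its key.
def pvMemoOK (val_range : List Int) (memo : PySem.Dict Int (List (List Int))) : Prop :=
  ∀ k v, memo.get? k = some v → 0 ≤ k ∧ v = pvComps0 val_range (k.toNat + 1) k

-- B's memoized recursion computes pvComps0 and preserves the memo invariant.
theorem pvCompsB_eq (val_range : List Int) (hpos : ∀ v ∈ val_range, 0 < v) :
    ∀ (fuel : Nat) (r : Int) (memo : PySem.Dict Int (List (List Int))),
      pvMemoOK val_range memo → 0 ≤ r → r < (fuel : Int) →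
      (pvCompsB val_range fuel r memo).1 = pvComps0 val_range fuel r ∧
        pvMemoOK val_range (pvCompsB val_range fuel r memo).2 := by
  intro fuel
  induction fuel with
  | zero => intro r _ _ _ h2; exact absurd h2 (by omega)
  | succ g ih =>
    intro r memo hmemo hr h2
    rcases hget : memo.get? r with _ | v
    case some =>
      obtain ⟨_, hv⟩ := hmemo r v hget
      refine ⟨?_, ?_⟩
      · show ((pvCompsB val_range (g + 1) r memo).1) = _
        simp only [pvCompsB, hget]
        rw [hv]
        exact pvComps0_fuel val_range hpos (r.toNat + 1) (g + 1) r hr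
          (by push_cast; omega) (by push_cast; omega)
      · show pvMemoOK val_range ((pvCompsB val_range (g + 1) r memo).2)
        simp only [pvCompsB, hget]
        exact hmemo
    case none =>
      simp only [pvCompsB, hget]
      by_cases hr0 : r = 0
      · subst hr0
        simp only [pvComps0]
        refine ⟨by simp, ?_⟩
        intro k v hk
        by_cases hkr : k = (0 : Int)
        · subst hkr
          rw [PySem.Dict.get?_insert_self] at hk
          refine ⟨le_refl 0, ?_⟩
          simp only [Option.some_inj] at hk
          simp [← hk, pvComps0]
        · rw [PySem.Dict.get?_insert_of_ne _ _ hkr] at hk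
          exact hmemo k v hk
      · simp only [hr0, if_false, pvComps0]
        have aux : ∀ (l : List Int), (∀ x ∈ l, x ∈ val_range) →
            ∀ (acc : List (List Int)) (m : PySem.Dict Int (List (List Int))),
              pvMemoOK val_range m →
              (l.foldl
                (fun acc num =>
                  if num ≤ r then
                    let q := pvCompsB val_range g (r - num) acc.2
                    (acc.1 ++ q.1.map (fun tail => num :: tail), q.2)
                  else acc) (acc, m)).1 =
                l.foldl
                  (fun acc num =>
                    if num ≤ r then
                      acc ++ (pvComps0 val_range g (r - num)).map (fun tail => num :: tail)
                    else acc) acc ∧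
              pvMemoOK val_range
                (l.foldl
                  (fun acc num =>
                    if num ≤ r then
                      let q := pvCompsB val_range g (r - num) acc.2
                      (acc.1 ++ q.1.map (fun tail => num :: tail), q.2)
                    else acc) (acc, m)).2 := by
          intro l
          induction l with
          | nil => intro _ acc m hm; exact ⟨rfl, hm⟩
          | cons num l ihl =>
            intro hmem acc m hm
            have hnum : num ∈ val_range := hmem num (by simp)
            have hrest : ∀ x ∈ l, x ∈ val_range := fun x hx => hmem x (by simp [hx])
            by_cases hle : num ≤ r
            · have hv := hpos num hnum
              obtain ⟨hq1, hq2⟩ := ih (r - num) m hm (by omega) (by omega)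
              simp only [List.foldl_cons, if_pos hle]
              rw [hq1]
              exact ihl hrest _ _ hq2
            · simp only [List.foldl_cons, if_neg hle]
              exact ihl hrest acc m hm
        obtain ⟨ha, hb⟩ := aux val_range (fun x hx => hx) [] memo hmemo
        refine ⟨ha, ?_⟩
        intro k v hk
        by_cases hkr : k = r
        · subst hkr
          rw [PySem.Dict.get?_insert_self] at hk
          simp only [Option.some_inj] at hk
          refine ⟨hr, ?_⟩
          rw [← hk, ha]
          have : pvComps0 val_range (g + 1) k = pvComps0 val_range (k.toNat + 1) k :=
            pvComps0_fuel val_range hpos (g + 1) (k.toNat + 1) k hr (by push_cast; omega) (by omega)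
          rw [← this]
          simp [pvComps0, hr0]
        · rw [PySem.Dict.get?_insert_of_ne _ _ hkr] at hk
          exact hb k v hk

-- ===== VERDICT (by name: the statement is the Claim_ definition above) =====
theorem enumerate_bit_compositions_spec : Claim_equal_enumerate_bit_compositions := by
  intro target val_range _ hpre
  obtain ⟨hpos', hband, hrange⟩ := hpre
  unfold Spec_enumerate_bit_compositions enumerate_bit_compositions enumerate_bit_compositions_alt
  have hcond : ¬ (target ≤ 0 ∨ PySem.Int.band target (target - 1) ≠ 0) := by
    rintro (h | h)
    · omega
    · exact h hband
  simp only [hcond, if_false]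
  rcases hrange with h1 | hpos
  · subst h1
    simp [pvBacktrackA, pvCompsB, PySem.Dict.get?_empty]
  · set bt : Int := (target.toNat.log2 : Int) with hbt
    have hbt0 : 0 ≤ bt := by positivity
    have hbtf : bt < ((bt.toNat + 1 : Nat) : Int) := by omega
    have hA := pvBacktrackA_eq bt val_range hpos (bt.toNat + 1) [] 0 []
      (by omega) (by omega)
    have hB := pvCompsB_eq val_range hpos (bt.toNat + 1) bt PySem.Dict.empty
      (fun k v hk => by simp [PySem.Dict.get?_empty] at hk) hbt0 hbtf
    rw [hA, hB.1]
    simp
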